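-- pv_equiv track=rewrite | github.com/zeek0x/encrypted-fmp4-hls-using-ffmpeg | hls_encrypt_watcher.py | insert_ext_x_key
-- ===== SOURCE A (Python) =====
-- def insert_ext_x_key(lines, key_line: str):
--     for i, l in enumerate(lines):
--         if l.startswith("#EXT-X-KEY"):
--             lines[i] = key_line
--             break
--     else:
--         insert_at = None
--         for i, l in enumerate(lines):
--             if l.startswith("#EXT-X-MAP"):
--                 insert_at = i
--                 break
--         if insert_at is None:
--             for i, l in enumerate(lines):
--                 if l.startswith("#EXTINF") or not l.startswith("#"):
--                     insert_at = i
--                     break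
--         if insert_at is None:
--             insert_at = len(lines)
--         lines.insert(insert_at, key_line)
--     return lines
-- ===== SOURCE B (Python) =====
-- def insert_ext_x_key(lines, key_line: str):
--     # single pass tracking the first occurrence of each relevant kind of line
--     key_idx = map_idx = content_idx = None
--     for i, l in enumerate(lines):
--         if key_idx is None and l.startswith("#EXT-X-KEY"):
--             key_idx = i
--         if map_idx is None and l.startswith("#EXT-X-MAP"):
--             map_idx = i
--         if content_idx is None and (l.startswith("#EXTINF") or not l.startswith("#")):
--             content_idx = i
--     if key_idx is not None:
--         lines[key_idx] = key_line
--     else: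
--         insert_at = map_idx if map_idx is not None else (content_idx if content_idx is not None else len(lines))
--         lines.insert(insert_at, key_line)
--     return lines
-- ===== Notes on version B (the rewrite author's own statement) =====
-- stated objective: alternative
-- what changed: B replaces A's three separate short-circuit scans over the list with a single pass that records the first key/map/content index in three optionals and then dispatches once.
import Mathlib
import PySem

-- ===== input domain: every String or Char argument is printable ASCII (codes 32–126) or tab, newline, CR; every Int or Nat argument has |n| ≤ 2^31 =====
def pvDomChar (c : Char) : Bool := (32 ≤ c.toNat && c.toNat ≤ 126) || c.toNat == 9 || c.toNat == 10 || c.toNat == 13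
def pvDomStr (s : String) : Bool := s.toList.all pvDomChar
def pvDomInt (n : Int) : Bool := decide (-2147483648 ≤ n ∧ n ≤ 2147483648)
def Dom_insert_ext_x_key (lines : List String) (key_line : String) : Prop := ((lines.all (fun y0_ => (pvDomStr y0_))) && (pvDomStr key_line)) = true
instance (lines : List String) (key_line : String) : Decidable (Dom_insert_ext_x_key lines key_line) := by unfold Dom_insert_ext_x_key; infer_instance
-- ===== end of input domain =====

-- B makes one pass recording three first-occurrence indices instead of A's three separate scans (same cost; return value only — both Pythons mutate `lines` in place identically).

-- ===== PORT A =====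
-- 'for i, l in enumerate(lines): if p(l): … break / else: …' — first index satisfying p
def pvFindIdxA (p : String → Bool) (i : Nat) : List String → Option Nat
  | [] => none
  | l :: rest => if p l then some i else pvFindIdxA p (i + 1) rest

def insert_ext_x_key (lines : List String) (key_line : String) : List String :=
  match pvFindIdxA (fun l => PySem.Str.startswith l "#EXT-X-KEY") 0 lines with
  | some i => lines.set i key_line          -- lines[i] = key_line
  | none =>
    let insert_at : Nat :=
      match pvFindIdxA (fun l => PySem.Str.startswith l "#EXT-X-MAP") 0 lines with
      | some i => i
      | none =>
        match pvFindIdxA (fun l => PySem.Str.startswith l "#EXTINF" || !PySem.Str.startswith l "#") 0 lines with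
        | some i => i
        | none => lines.length
    PySem.List.insert lines (insert_at : Int) key_line

-- ===== PORT B =====
-- single pass: first key / map / content line indices (none = not yet seen)
def pvScan3 (i : Nat) : List String → Option Nat × Option Nat × Option Nat
  | [] => (none, none, none)
  | l :: rest =>
    let (k, m, c) := pvScan3 (i + 1) rest
    ((if PySem.Str.startswith l "#EXT-X-KEY" then some i else k),
     (if PySem.Str.startswith l "#EXT-X-MAP" then some i else m),
     (if PySem.Str.startswith l "#EXTINF" || !PySem.Str.startswith l "#" then some i else c))

def insert_ext_x_key_alt (lines : List String) (key_line : String) : List String :=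
  let (key_idx, map_idx, content_idx) := pvScan3 0 lines
  match key_idx with
  | some i => lines.set i key_line
  | none =>
    let insert_at : Nat := map_idx.getD (content_idx.getD lines.length)
    PySem.List.insert lines (insert_at : Int) key_line

-- ===== PRECONDITION & SPEC =====
def Spec_insert_ext_x_key (lines : List String) (key_line : String) (out : List String) : Prop := out = insert_ext_x_key_alt lines key_line
instance (lines : List String) (key_line : String) (out : List String) : Decidable (Spec_insert_ext_x_key lines key_line out) := by unfold Spec_insert_ext_x_key; infer_instance

-- ===== CLAIM (what is proved, stated in full; the proofs are below) =====
def Claim_equal_insert_ext_x_key : Prop := ∀ (lines : List String) (key_line : String), Dom_insert_ext_x_key lines key_line → Spec_insert_ext_x_key lines key_line (insert_ext_x_key lines key_line)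

-- ===== LEMMAS AND PROOFS =====
theorem pvScan3_eq (lines : List String) (i : Nat) :
    pvScan3 i lines =
      (pvFindIdxA (fun l => PySem.Str.startswith l "#EXT-X-KEY") i lines,
       pvFindIdxA (fun l => PySem.Str.startswith l "#EXT-X-MAP") i lines,
       pvFindIdxA (fun l => PySem.Str.startswith l "#EXTINF" || !PySem.Str.startswith l "#") i lines) := by
  induction lines generalizing i with
  | nil => rfl
  | cons l rest ih => simp [pvScan3, pvFindIdxA, ih]

-- ===== VERDICT (by name: the statement is the Claim_ definition above) =====
theorem insert_ext_x_key_spec : Claim_equal_insert_ext_x_key := by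
  intro lines key_line _
  unfold Spec_insert_ext_x_key insert_ext_x_key insert_ext_x_key_alt
  rw [pvScan3_eq]
  cases pvFindIdxA (fun l => PySem.Str.startswith l "#EXT-X-KEY") 0 lines with
  | some i => rfl
  | none =>
    cases pvFindIdxA (fun l => PySem.Str.startswith l "#EXT-X-MAP") 0 lines with
    | some i => rfl
    | none =>
      cases pvFindIdxA (fun l => PySem.Str.startswith l "#EXTINF" || !PySem.Str.startswith l "#") 0 lines with
      | some i => rfl
      | none => rfl
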